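-- pv_equiv track=rewrite | github.com/BKZhao/MIMIC-Papers-Repro-Agent | src/repro_agent/paper/builder.py | _map_paper_evidence_artifact_to_output_name
-- ===== SOURCE A (Python) =====
-- def _map_paper_evidence_artifact_to_output_name(label: str) -> str:
--     lowered = label.strip().lower()
--     if not lowered:
--         return ""
--     if any(
--         token in lowered
--         for token in ("flowchart", "flow chart", "participant selection", "patient selection", "study flow")
--     ):
--         return "cohort_flowchart_figure"
--     if any(token in lowered for token in ("kaplan", "kaplan-meier", "km curve", "survival curve", "log-rank")):
--         return "km_figure"
--     if any(token in lowered for token in ("restricted cubic spline", "rcs", "spline curve")):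
--         return "rcs_figure"
--     if any(token in lowered for token in ("subgroup", "forest plot", "forest")):
--         return "subgroup_figure"
--     if any(token in lowered for token in ("roc", "auc curve")):
--         return "roc_figure"
--     if any(token in lowered for token in ("calibration", "calibration curve", "calibration plot")):
--         return "calibration_figure"
--     if any(token in lowered for token in ("decision curve", "net benefit", "dca")):
--         return "decision_curve_figure"
--     if "nomogram" in lowered:
--         return "nomogram_figure"
--     if "shap" in lowered or "beeswarm" in lowered:
--         return "shap_figure"
--     if "love plot" in lowered:
--         return "love_plot_figure"
--     if any(token in lowered for token in ("cumulative incidence", "fine-gray", "competing risk", "cif")):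
--         return "cif_figure"
--     if any(token in lowered for token in ("lasso path", "lasso trace", "regularization path")):
--         return "lasso_trace_figure"
--     if "time-dependent auc" in lowered or "time dependent auc" in lowered:
--         return "time_auc_figure"
--     if any(token in lowered for token in ("posterior survival", "bayesian survival")):
--         return "posterior_survival_figure"
--     if any(
--         token in lowered
--         for token in ("boxplot", "box plot", "violin plot", "swarm plot", "strip plot", "histogram", "density plot")
--     ):
--         return "distribution_figure"
--     if any(token in lowered for token in ("heatmap", "correlation matrix", "clustermap")):
--         return "heatmap_figure"
--     if "trajectory" in lowered:
--         return "trajectory_figure"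
--     if any(token in lowered for token in ("baseline characteristics", "baseline table", "table 1")):
--         return "baseline_table"
--     if any(token in lowered for token in ("cox regression", "hazard ratio", "multivariable cox", "table 2")):
--         return "cox_results_table"
--     if any(token in lowered for token in ("logistic regression", "odds ratio", "multivariable model")):
--         return "model_results_table"
--     return ""
-- ===== SOURCE B (Python) =====
-- # Single left-to-right pass over the text: at every start position, naive
-- # prefix-match each token and keep the smallest (highest-priority) rule index
-- # seen; the answer is the name of that rule.  No per-token substring searches.
--
-- _TOKENS = [
--     "flowchart", "flow chart", "participant selection", "patient selection", "study flow",
--     "kaplan", "kaplan-meier", "km curve", "survival curve", "log-rank",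
--     "restricted cubic spline", "rcs", "spline curve",
--     "subgroup", "forest plot", "forest",
--     "roc", "auc curve",
--     "calibration", "calibration curve", "calibration plot",
--     "decision curve", "net benefit", "dca",
--     "nomogram",
--     "shap", "beeswarm",
--     "love plot",
--     "cumulative incidence", "fine-gray", "competing risk", "cif",
--     "lasso path", "lasso trace", "regularization path",
--     "time-dependent auc", "time dependent auc",
--     "posterior survival", "bayesian survival",
--     "boxplot", "box plot", "violin plot", "swarm plot", "strip plot", "histogram", "density plot",
--     "heatmap", "correlation matrix", "clustermap",
--     "trajectory",
--     "baseline characteristics", "baseline table", "table 1",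
--     "cox regression", "hazard ratio", "multivariable cox", "table 2",
--     "logistic regression", "odds ratio", "multivariable model",
-- ]
--
-- _NAMES = (
--     ["cohort_flowchart_figure"] * 5 + ["km_figure"] * 5 + ["rcs_figure"] * 3
--     + ["subgroup_figure"] * 3 + ["roc_figure"] * 2 + ["calibration_figure"] * 3
--     + ["decision_curve_figure"] * 3 + ["nomogram_figure"] + ["shap_figure"] * 2
--     + ["love_plot_figure"] + ["cif_figure"] * 4 + ["lasso_trace_figure"] * 3
--     + ["time_auc_figure"] * 2 + ["posterior_survival_figure"] * 2
--     + ["distribution_figure"] * 7 + ["heatmap_figure"] * 3 + ["trajectory_figure"]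
--     + ["baseline_table"] * 3 + ["cox_results_table"] * 4 + ["model_results_table"] * 3
-- )
--
-- # index the rules by their first character so each position only tries the
-- # tokens that can possibly start there
-- _BY_FIRST = {}
-- for _i, _tok in enumerate(_TOKENS):
--     _BY_FIRST.setdefault(_tok[0], []).append((_i, _tok))
--
--
-- def _map_paper_evidence_artifact_to_output_name(label: str) -> str:
--     lowered = label.strip().lower()
--     best = len(_TOKENS)
--     for start in range(len(lowered)):
--         for i, tok in _BY_FIRST.get(lowered[start], ()):
--             if i < best and lowered.startswith(tok, start):
--                 best = i
--     return _NAMES[best] if best < len(_TOKENS) else ""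
-- ===== Notes on version B (the rewrite author's own statement) =====
-- stated objective: alternative
-- what changed: Instead of A's 21-branch cascade of per-token substring searches, B builds a first-character bucket index over the 60 (priority, token) rules and makes one left-to-right pass over the text, prefix-matching at each start position only the tokens bucketed under that character while keeping a min-priority accumulator; the answer is the name of the smallest matching rule index.
import Mathlib
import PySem

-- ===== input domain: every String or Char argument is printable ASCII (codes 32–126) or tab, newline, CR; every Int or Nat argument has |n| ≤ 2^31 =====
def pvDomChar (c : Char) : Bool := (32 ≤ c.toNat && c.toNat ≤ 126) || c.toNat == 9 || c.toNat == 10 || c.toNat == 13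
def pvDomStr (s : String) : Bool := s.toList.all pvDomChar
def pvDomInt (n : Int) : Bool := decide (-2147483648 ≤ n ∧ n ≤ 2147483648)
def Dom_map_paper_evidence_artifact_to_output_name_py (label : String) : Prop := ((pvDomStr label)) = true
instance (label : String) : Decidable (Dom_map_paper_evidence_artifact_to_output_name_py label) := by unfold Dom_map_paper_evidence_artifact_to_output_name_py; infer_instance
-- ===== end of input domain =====

-- B replaces A's 21-branch cascade of per-token substring searches by a first-character bucket index over the rules and one left-to-right pass over the text that prefix-matches the bucketed tokens at each start position, keeping a min-priority accumulator (alternative algorithm, same return value, not faster).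


-- ===== PORT A =====
-- Port of A: branch cascade, each condition an any(...) over its token tuple (substring test = PySem.Str.isIn).
def map_paper_evidence_artifact_to_output_name_py (label : String) : String :=
  let lowered := PySem.Str.lower (PySem.Str.strip label)
  if lowered = "" then "" else
  if List.any ["flowchart", "flow chart", "participant selection", "patient selection", "study flow"] (fun token => PySem.Str.isIn token lowered) then "cohort_flowchart_figure" else
  if List.any ["kaplan", "kaplan-meier", "km curve", "survival curve", "log-rank"] (fun token => PySem.Str.isIn token lowered) then "km_figure" else
  if List.any ["restricted cubic spline", "rcs", "spline curve"] (fun token => PySem.Str.isIn token lowered) then "rcs_figure" else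
  if List.any ["subgroup", "forest plot", "forest"] (fun token => PySem.Str.isIn token lowered) then "subgroup_figure" else
  if List.any ["roc", "auc curve"] (fun token => PySem.Str.isIn token lowered) then "roc_figure" else
  if List.any ["calibration", "calibration curve", "calibration plot"] (fun token => PySem.Str.isIn token lowered) then "calibration_figure" else
  if List.any ["decision curve", "net benefit", "dca"] (fun token => PySem.Str.isIn token lowered) then "decision_curve_figure" else
  if PySem.Str.isIn "nomogram" lowered then "nomogram_figure" else
  if (PySem.Str.isIn "shap" lowered || PySem.Str.isIn "beeswarm" lowered) then "shap_figure" else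
  if PySem.Str.isIn "love plot" lowered then "love_plot_figure" else
  if List.any ["cumulative incidence", "fine-gray", "competing risk", "cif"] (fun token => PySem.Str.isIn token lowered) then "cif_figure" else
  if List.any ["lasso path", "lasso trace", "regularization path"] (fun token => PySem.Str.isIn token lowered) then "lasso_trace_figure" else
  if (PySem.Str.isIn "time-dependent auc" lowered || PySem.Str.isIn "time dependent auc" lowered) then "time_auc_figure" else
  if List.any ["posterior survival", "bayesian survival"] (fun token => PySem.Str.isIn token lowered) then "posterior_survival_figure" else
  if List.any ["boxplot", "box plot", "violin plot", "swarm plot", "strip plot", "histogram", "density plot"] (fun token => PySem.Str.isIn token lowered) then "distribution_figure" else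
  if List.any ["heatmap", "correlation matrix", "clustermap"] (fun token => PySem.Str.isIn token lowered) then "heatmap_figure" else
  if PySem.Str.isIn "trajectory" lowered then "trajectory_figure" else
  if List.any ["baseline characteristics", "baseline table", "table 1"] (fun token => PySem.Str.isIn token lowered) then "baseline_table" else
  if List.any ["cox regression", "hazard ratio", "multivariable cox", "table 2"] (fun token => PySem.Str.isIn token lowered) then "cox_results_table" else
  if List.any ["logistic regression", "odds ratio", "multivariable model"] (fun token => PySem.Str.isIn token lowered) then "model_results_table" else
  ""

-- ===== PORT B =====
-- Port of B (Source B): _TOKENS in priority order, _NAMES aligned; the rules indexed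
-- by first character (_BY_FIRST); one pass over all start positions of the lowered
-- text, prefix-matching the tokens of the bucket of the character at that position
-- and keeping the smallest matching rule index in `best`.
def pvTokens : List String := [
  "flowchart", "flow chart", "participant selection", "patient selection", "study flow",
  "kaplan", "kaplan-meier", "km curve", "survival curve", "log-rank",
  "restricted cubic spline", "rcs", "spline curve",
  "subgroup", "forest plot", "forest",
  "roc", "auc curve",
  "calibration", "calibration curve", "calibration plot",
  "decision curve", "net benefit", "dca",
  "nomogram",
  "shap", "beeswarm",
  "love plot",
  "cumulative incidence", "fine-gray", "competing risk", "cif",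
  "lasso path", "lasso trace", "regularization path",
  "time-dependent auc", "time dependent auc",
  "posterior survival", "bayesian survival",
  "boxplot", "box plot", "violin plot", "swarm plot", "strip plot", "histogram", "density plot",
  "heatmap", "correlation matrix", "clustermap",
  "trajectory",
  "baseline characteristics", "baseline table", "table 1",
  "cox regression", "hazard ratio", "multivariable cox", "table 2",
  "logistic regression", "odds ratio", "multivariable model"]

def pvNames : List String := [
  "cohort_flowchart_figure", "cohort_flowchart_figure", "cohort_flowchart_figure", "cohort_flowchart_figure", "cohort_flowchart_figure",
  "km_figure", "km_figure", "km_figure", "km_figure", "km_figure",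
  "rcs_figure", "rcs_figure", "rcs_figure",
  "subgroup_figure", "subgroup_figure", "subgroup_figure",
  "roc_figure", "roc_figure",
  "calibration_figure", "calibration_figure", "calibration_figure",
  "decision_curve_figure", "decision_curve_figure", "decision_curve_figure",
  "nomogram_figure",
  "shap_figure", "shap_figure",
  "love_plot_figure",
  "cif_figure", "cif_figure", "cif_figure", "cif_figure",
  "lasso_trace_figure", "lasso_trace_figure", "lasso_trace_figure",
  "time_auc_figure", "time_auc_figure",
  "posterior_survival_figure", "posterior_survival_figure",
  "distribution_figure", "distribution_figure", "distribution_figure", "distribution_figure", "distribution_figure", "distribution_figure", "distribution_figure",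
  "heatmap_figure", "heatmap_figure", "heatmap_figure",
  "trajectory_figure",
  "baseline_table", "baseline_table", "baseline_table",
  "cox_results_table", "cox_results_table", "cox_results_table", "cox_results_table",
  "model_results_table", "model_results_table", "model_results_table"]

-- `_BY_FIRST.setdefault(_tok[0], []).append((_i, _tok))` = Dict.modify (get-or-[] then append);
-- tok[0] ported as toList.headD ' ' (exact: every token is nonempty)
def pvByFirst : PySem.Dict Char (List (Int × String)) :=
  (PySem.List.enumerate pvTokens).foldl
    (fun d p => d.modify (p.2.toList.headD ' ') [] (· ++ [p])) PySem.Dict.empty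

-- the inner `for i, tok in _BY_FIRST.get(lowered[start], ()): if i < best and lowered.startswith(tok, start): best = i`
-- (startswith at offset `start` = Chars.startswith on the suffix list, exact)
def pvInner (suffix : List Char) : List (Int × String) → Int → Int
  | [], best => best
  | (i, t) :: rest, best =>
      pvInner suffix rest (if i < best ∧ PySem.Chars.startswith suffix t.toList = true then i else best)

-- the outer `for start in range(len(lowered))`: structural recursion on the suffix
-- starting at `start`; its head is `lowered[start]` (exact)
def pvOuter : List Char → Int → Int
  | [], best => best
  | c :: rest, best => pvOuter rest (pvInner (c :: rest) (PySem.Dict.getD pvByFirst c []) best)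

def map_paper_evidence_artifact_to_output_name_py_alt (label : String) : String :=
  let lowered := PySem.Str.lower (PySem.Str.strip label)
  let best := pvOuter lowered.toList (pvTokens.length : Int)
  -- `_NAMES[best] if best < len(_TOKENS) else ""`; the guard keeps best in range, so xs[best] = pyGetD (exact)
  if best < (pvTokens.length : Int) then PySem.List.pyGetD pvNames best "" else ""

-- ===== PRECONDITION & SPEC =====
def Spec_map_paper_evidence_artifact_to_output_name_py (label : String) (out : String) : Prop := out = map_paper_evidence_artifact_to_output_name_py_alt label
instance (label : String) (out : String) : Decidable (Spec_map_paper_evidence_artifact_to_output_name_py label out) := by unfold Spec_map_paper_evidence_artifact_to_output_name_py; infer_instance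

-- ===== CLAIM (what is proved, stated in full; the proofs are below) =====
def Claim_equal_map_paper_evidence_artifact_to_output_name_py : Prop := ∀ (label : String), Dom_map_paper_evidence_artifact_to_output_name_py label → Spec_map_paper_evidence_artifact_to_output_name_py label (map_paper_evidence_artifact_to_output_name_py label)

-- ===== LEMMAS AND PROOFS =====

-- proof-side reference: A's cascade as a flat ordered first-match scan
def pvRules : List (String × String) := List.zip pvTokens pvNames

def pvScan (lowered : String) : List (String × String) → String
  | [] => ""
  | (token, name) :: rest =>
      if PySem.Str.isIn token lowered then name else pvScan lowered rest

-- merges two adjacent if-branches with the same result into one or-condition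
theorem pvIf_if_same {α : Type} (a b : Bool) (x y : α) :
    (if a then x else if b then x else y) = (if (a || b) then x else y) := by
  cases a <;> cases b <;> simp

theorem pvA_eq_scan (label : String) :
    map_paper_evidence_artifact_to_output_name_py label =
      (if PySem.Str.lower (PySem.Str.strip label) = "" then ""
       else pvScan (PySem.Str.lower (PySem.Str.strip label)) pvRules) := by
  unfold map_paper_evidence_artifact_to_output_name_py
  simp only [pvRules, pvTokens, pvNames, List.zip, List.zipWith, pvScan,
    List.any_cons, List.any_nil, Bool.or_false, pvIf_if_same]

theorem pvInner_le (ps : List (Int × String)) (suffix : List Char) (best : Int) :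
    pvInner suffix ps best ≤ best := by
  induction ps generalizing best with
  | nil => simp [pvInner]
  | cons p rest ih =>
      obtain ⟨i, t⟩ := p
      simp only [pvInner]
      refine le_trans (ih _) ?_
      split <;> omega

theorem pvInner_min (ps : List (Int × String)) (suffix : List Char) (best : Int)
    (i : Int) (t : String) (hmem : (i, t) ∈ ps)
    (hpre : PySem.Chars.startswith suffix t.toList = true) :
    pvInner suffix ps best ≤ i := by
  induction ps generalizing best with
  | nil => simp at hmem
  | cons p rest ih =>
      obtain ⟨j, u⟩ := p
      simp only [pvInner]
      rcases List.mem_cons.mp hmem with h | h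
      · rw [Prod.mk.injEq] at h
        obtain ⟨h1, h2⟩ := h
        subst h1; subst h2
        by_cases hlt : i < best
        · rw [if_pos ⟨hlt, hpre⟩]; exact pvInner_le _ _ _
        · refine le_trans (pvInner_le _ _ _) ?_
          split <;> omega
      · exact ih _ h

theorem pvInner_cases (ps : List (Int × String)) (suffix : List Char) (best : Int) :
    pvInner suffix ps best = best ∨
      ∃ i t, (i, t) ∈ ps ∧ pvInner suffix ps best = i ∧
        PySem.Chars.startswith suffix t.toList = true := by
  induction ps generalizing best with
  | nil => exact Or.inl rfl
  | cons p rest ih =>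
      obtain ⟨j, u⟩ := p
      simp only [pvInner]
      by_cases hc : j < best ∧ PySem.Chars.startswith suffix u.toList = true
      · rw [if_pos hc]
        rcases ih j with h | ⟨i, t, hm, he, hp⟩
        · exact Or.inr ⟨j, u, List.mem_cons_self .., h, hc.2⟩
        · exact Or.inr ⟨i, t, List.mem_cons_of_mem _ hm, he, hp⟩
      · rw [if_neg hc]
        rcases ih best with h | ⟨i, t, hm, he, hp⟩
        · exact Or.inl h
        · exact Or.inr ⟨i, t, List.mem_cons_of_mem _ hm, he, hp⟩

theorem pvOuter_le (chars : List Char) (best : Int) : pvOuter chars best ≤ best := by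
  induction chars generalizing best with
  | nil => simp [pvOuter]
  | cons c rest ih => exact le_trans (ih _) (pvInner_le _ _ _)

-- literal facts about the first-character index
set_option maxRecDepth 100000 in
theorem pvBucket_complete (m : Nat) (hm : m < 60) :
    ((m : Int), pvTokens.getD m "") ∈
      PySem.Dict.getD pvByFirst ((pvTokens.getD m "").toList.headD ' ') [] := by
  revert m; decide

set_option maxRecDepth 100000 in
theorem pvBucket_items_sub (q : Char × List (Int × String)) (hq : q ∈ pvByFirst.items)
    (p : Int × String) (hp : p ∈ q.2) : p ∈ PySem.List.enumerate pvTokens := by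
  revert q p; decide

theorem pvBucket_sub (c : Char) (p : Int × String)
    (hp : p ∈ PySem.Dict.getD pvByFirst c []) : p ∈ PySem.List.enumerate pvTokens := by
  rw [PySem.Dict.getD_eq_get?_getD] at hp
  cases hg : PySem.Dict.get? pvByFirst c with
  | none => rw [hg] at hp; simp at hp
  | some l =>
      rw [hg] at hp
      exact pvBucket_items_sub (c, l) (PySem.Dict.mem_items_of_get?_eq_some _ hg) p (by simpa using hp)

theorem pvTokens_ne' (m : Nat) (hm : m < 60) : (pvTokens.getD m "").toList ≠ [] := by
  revert m; decide

theorem pvOuter_min (chars : List Char) (best : Int) (m : Nat) (hm : m < 60)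
    (hinf : (pvTokens.getD m "").toList <:+: chars) :
    pvOuter chars best ≤ (m : Int) := by
  induction chars generalizing best with
  | nil => exact absurd (List.eq_nil_of_infix_nil hinf) (pvTokens_ne' m hm)
  | cons c rest ih =>
      simp only [pvOuter]
      rcases List.infix_cons_iff.mp hinf with hpre | hinf'
      · have hhead : (pvTokens.getD m "").toList.headD ' ' = c := by
          obtain ⟨u, hu⟩ := hpre
          cases htl : (pvTokens.getD m "").toList with
          | nil => exact absurd htl (pvTokens_ne' m hm)
          | cons a tl =>
              rw [htl] at hu
              simp only [List.cons_append] at hu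
              injection hu with h1 _
        refine le_trans (pvOuter_le _ _) ?_
        exact pvInner_min _ _ _ _ _ (hhead ▸ pvBucket_complete m hm)
          ((PySem.Chars.startswith_iff _ _).mpr hpre)
      · exact ih _ hinf'

theorem pvOuter_cases (chars : List Char) (best : Int) :
    pvOuter chars best = best ∨
      ∃ i t, (i, t) ∈ PySem.List.enumerate pvTokens ∧ pvOuter chars best = i ∧
        t.toList <:+: chars := by
  induction chars generalizing best with
  | nil => exact Or.inl rfl
  | cons c rest ih =>
      simp only [pvOuter]
      rcases ih (pvInner (c :: rest) (PySem.Dict.getD pvByFirst c []) best) with h | ⟨i, t, hm, he, hinf⟩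
      · rw [h]
        rcases pvInner_cases (PySem.Dict.getD pvByFirst c []) (c :: rest) best with h2 | ⟨i, t, hm, he, hp⟩
        · exact Or.inl h2
        · exact Or.inr ⟨i, t, pvBucket_sub c (i, t) hm, he,
            ((PySem.Chars.startswith_iff _ _).mp hp).isInfix⟩
      · exact Or.inr ⟨i, t, hm, he, hinf.trans (List.infix_cons (List.infix_refl _))⟩

-- first-match scan: the first matching rule wins
theorem pvScan_eq_of_first (rules : List (String × String)) (lowered : String) (k : Nat)
    (hk : k < rules.length)
    (hbefore : ∀ m, m < k → PySem.Str.isIn (rules.getD m ("", "")).1 lowered = false)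
    (hhit : PySem.Str.isIn (rules.getD k ("", "")).1 lowered = true) :
    pvScan lowered rules = (rules.getD k ("", "")).2 := by
  induction rules generalizing k with
  | nil => simp at hk
  | cons r rest ih =>
      obtain ⟨token, name⟩ := r
      cases k with
      | zero =>
          simp only [List.getD] at hhit ⊢
          simp only [pvScan]
          rw [if_pos (by simpa using hhit)]
          simp
      | succ k =>
          have h0 := hbefore 0 (Nat.succ_pos k)
          simp only [List.getD] at h0
          simp only [pvScan]
          rw [if_neg (by simpa using h0)]
          have := ih k (by simpa using hk)
            (fun m hm => by simpa using hbefore (m + 1) (by omega))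
            (by simpa using hhit)
          simpa using this

theorem pvScan_eq_empty (rules : List (String × String)) (lowered : String)
    (h : ∀ pr ∈ rules, PySem.Str.isIn pr.1 lowered = false) :
    pvScan lowered rules = "" := by
  induction rules with
  | nil => rfl
  | cons r rest ih =>
      obtain ⟨token, name⟩ := r
      simp only [pvScan]
      rw [if_neg (by simpa using h (token, name) (List.mem_cons_self ..))]
      exact ih (fun pr hpr => h pr (List.mem_cons_of_mem _ hpr))

-- literal facts about the rule tables
theorem pvRules_fst (m : Nat) (hm : m < 60) : (pvRules.getD m ("", "")).1 = pvTokens.getD m "" := by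
  revert m; decide

theorem pvRules_snd (m : Nat) (hm : m < 60) : (pvRules.getD m ("", "")).2 = pvNames.getD m "" := by
  revert m; decide

theorem pvTokens_len : pvTokens.length = 60 := by decide

theorem pvRules_len : pvRules.length = 60 := by decide

-- ===== VERDICT (by name: the statement is the Claim_ definition above) =====
theorem map_paper_evidence_artifact_to_output_name_py_spec : Claim_equal_map_paper_evidence_artifact_to_output_name_py := by
  intro label _
  unfold Spec_map_paper_evidence_artifact_to_output_name_py
  rw [pvA_eq_scan]
  rw [show map_paper_evidence_artifact_to_output_name_py_alt label =
        (if pvOuter (PySem.Str.lower (PySem.Str.strip label)).toList (pvTokens.length : Int) < (pvTokens.length : Int)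
         then PySem.List.pyGetD pvNames (pvOuter (PySem.Str.lower (PySem.Str.strip label)).toList (pvTokens.length : Int)) ""
         else "") from rfl]
  set lowered := PySem.Str.lower (PySem.Str.strip label) with hlow
  by_cases h : lowered = ""
  · rw [if_pos h, h]
    decide
  · rw [if_neg h]
    rcases pvOuter_cases lowered.toList (pvTokens.length : Int) with hout | ⟨i, t, hmem, hout, hinf⟩
    · -- no token matched: both sides are ""
      rw [hout, if_neg (by omega)]
      refine pvScan_eq_empty _ _ (fun pr hpr => ?_)
      by_contra hcon
      have htrue : PySem.Str.isIn pr.1 lowered = true := by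
        cases hh : PySem.Str.isIn pr.1 lowered
        · exact absurd hh hcon
        · rfl
      obtain ⟨m, hm, hget⟩ := List.mem_iff_getElem.mp hpr
      have hm60 : m < 60 := by rw [pvRules_len] at hm; exact hm
      have hfst : pr.1 = pvTokens.getD m "" := by
        rw [← hget, ← pvRules_fst m hm60, List.getD_eq_getElem _ _ hm]
      have hinf : pr.1.toList <:+: lowered.toList := (PySem.Str.isIn_iff_infix ..).mp htrue
      have := pvOuter_min lowered.toList (pvTokens.length : Int) m hm60 (hfst ▸ hinf)
      rw [hout, pvTokens_len] at this
      omega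
    · -- token t with flat index i matched; i is the least matching index
      obtain ⟨k, hk, hpair⟩ := (PySem.List.mem_enumerate_iff ..).mp hmem
      have hk60 : k < 60 := by rw [pvTokens_len] at hk; exact hk
      have hi : i = (k : Int) := by
        have := congrArg Prod.fst hpair; simpa using this
      have ht : t = pvTokens.getD k "" := by
        have := congrArg Prod.snd hpair
        simpa [List.getD, List.getElem?_eq_getElem hk] using this
      rw [hout, hi, if_pos (by rw [pvTokens_len]; exact_mod_cast hk60)]
      rw [PySem.List.pyGetD_natCast]
      -- A's scan stops exactly at rule k
      have hscan : pvScan lowered pvRules = (pvRules.getD k ("", "")).2 := by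
        refine pvScan_eq_of_first _ _ k (by rw [pvRules_len]; exact hk60) ?_ ?_
        · intro m hmk
          by_contra hcon
          have htrue : PySem.Str.isIn (pvRules.getD m ("", "")).1 lowered = true := by
            cases hh : PySem.Str.isIn (pvRules.getD m ("", "")).1 lowered
            · exact absurd hh hcon
            · rfl
          have hm60 : m < 60 := by omega
          rw [pvRules_fst m hm60] at htrue
          have hinf' : (pvTokens.getD m "").toList <:+: lowered.toList :=
            (PySem.Str.isIn_iff_infix ..).mp htrue
          have := pvOuter_min lowered.toList (pvTokens.length : Int) m hm60 hinf'
          rw [hout, hi] at this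
          exact absurd (by exact_mod_cast this) (by omega)
        · rw [pvRules_fst k hk60, ← ht]
          exact (PySem.Str.isIn_iff_infix ..).mpr hinf
      rw [hscan, pvRules_snd k hk60]
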